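-- pv_equiv track=rewrite | github.com/Vahid-Kh/DataManagement | Archive/210106/funcTxtAnalytics.py | stripTags
-- ===== SOURCE A (Python) =====
-- def stripTags(pageContents):
--     pageContents = str(pageContents)
--     startLoc = pageContents.find("<p>")
--     endLoc = pageContents.rfind("<br/>")
--     pageContents = pageContents[startLoc:endLoc]
--
--     inside = 0
--     text = ''
--
--     for char in pageContents:
--         if char == '<':
--             inside = 1
--         elif (inside == 1 and char == '>'):
--             inside = 0
--         elif inside == 1:
--             continue
--         else:
--             text += char
--
--     return text
-- ===== SOURCE B (Python) =====
-- def stripTags(pageContents):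
--     pageContents = str(pageContents)
--     s = pageContents[pageContents.find("<p>"):pageContents.rfind("<br/>")]
--     parts = []
--     while True:
--         before, lt, rest = s.partition('<')
--         parts.append(before)
--         if not lt:
--             break
--         _, gt, s = rest.partition('>')
--         if not gt:
--             break
--     return ''.join(parts)
-- ===== Notes on version B (the rewrite author's own statement) =====
-- stated objective: simpler
-- what changed: Replaced the char-by-char 0/1 state machine with a chunked scan that repeatedly partitions on '<' (keeping the text before it) and on '>' (skipping the tag), joining the kept chunks.
import Mathlib
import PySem

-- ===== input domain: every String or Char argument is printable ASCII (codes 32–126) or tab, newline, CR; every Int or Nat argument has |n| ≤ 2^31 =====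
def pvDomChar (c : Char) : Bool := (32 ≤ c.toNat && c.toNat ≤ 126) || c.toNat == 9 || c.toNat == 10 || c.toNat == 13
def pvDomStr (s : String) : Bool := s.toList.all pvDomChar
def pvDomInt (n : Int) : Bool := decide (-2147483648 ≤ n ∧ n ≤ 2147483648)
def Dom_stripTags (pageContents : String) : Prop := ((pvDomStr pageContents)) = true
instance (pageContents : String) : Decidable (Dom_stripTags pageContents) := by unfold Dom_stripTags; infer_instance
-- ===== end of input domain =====

-- B replaces A's char-by-char inside/outside state machine with a chunked scan that partitions
-- on '<' (keeping the text before it) and on '>' (dropping the tag); objective: simpler.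

-- ===== PORT A =====
-- A's for-loop: state (inside, text), branches in A's order
def stripTagsLoopA (s : List Char) (st : Int × List Char) : Int × List Char :=
  s.foldl (fun st c =>
    if c = '<' then (1, st.2)
    else if st.1 = 1 ∧ c = '>' then (0, st.2)
    else if st.1 = 1 then st
    else (st.1, st.2 ++ [c])) st

def stripTags (pageContents : String) : String :=
  -- str(pageContents) is the identity on a string
  let startLoc := PySem.Str.find pageContents "<p>"
  let endLoc := PySem.Str.rfind pageContents "<br/>"
  let sliced := PySem.Chars.slice pageContents.toList (some startLoc) (some endLoc)
  String.ofList (stripTagsLoopA sliced (0, [])).2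

-- ===== PORT B =====
-- Source B's while-loop: before, lt, rest = s.partition('<') is (takeWhile, head, tail of dropWhile);
-- keep `before`; if '<' was found, drop through the first '>' (second partition) and repeat
def stripTagsLoopB (s : List Char) : List Char :=
  if (s.dropWhile (· ≠ '<')).isEmpty then s.takeWhile (· ≠ '<')
  else if ((s.dropWhile (· ≠ '<')).tail.dropWhile (· ≠ '>')).isEmpty then s.takeWhile (· ≠ '<')
  else s.takeWhile (· ≠ '<') ++ stripTagsLoopB ((s.dropWhile (· ≠ '<')).tail.dropWhile (· ≠ '>')).tail
termination_by s.length
decreasing_by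
  have h1 : (s.dropWhile (· ≠ '<')).length ≤ s.length := List.length_dropWhile_le _ _
  have h3 : ((s.dropWhile (· ≠ '<')).tail.dropWhile (· ≠ '>')).length ≤ (s.dropWhile (· ≠ '<')).tail.length := List.length_dropWhile_le _ _
  simp only [List.isEmpty_iff, ← List.length_eq_zero_iff, List.length_tail] at *
  omega

def stripTags_alt (pageContents : String) : String :=
  let startLoc := PySem.Str.find pageContents "<p>"
  let endLoc := PySem.Str.rfind pageContents "<br/>"
  let sliced := PySem.Chars.slice pageContents.toList (some startLoc) (some endLoc)
  String.ofList (stripTagsLoopB sliced)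

-- ===== PRECONDITION & SPEC =====
def Spec_stripTags (pageContents : String) (out : String) : Prop := out = stripTags_alt pageContents
instance (pageContents : String) (out : String) : Decidable (Spec_stripTags pageContents out) := by unfold Spec_stripTags; infer_instance

-- ===== CLAIM (what is proved, stated in full; the proofs are below) =====
def Claim_equal_stripTags : Prop := ∀ (pageContents : String), Dom_stripTags pageContents → Spec_stripTags pageContents (stripTags pageContents)

-- ===== LEMMAS AND PROOFS =====

-- B's loop as seen from inside a tag: skip to the first '>' then continue
def skipTag (s : List Char) : List Char :=
  if (s.dropWhile (· ≠ '>')).isEmpty then [] else stripTagsLoopB (s.dropWhile (· ≠ '>')).tail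

lemma loopB_nil : stripTagsLoopB [] = [] := by
  rw [stripTagsLoopB.eq_def]; simp

lemma loopB_cons_ne (c : Char) (tl : List Char) (hc : c ≠ '<') :
    stripTagsLoopB (c :: tl) = c :: stripTagsLoopB tl := by
  conv_lhs => rw [stripTagsLoopB.eq_def]
  conv_rhs => rw [stripTagsLoopB.eq_def]
  simp only [List.takeWhile_cons, List.dropWhile_cons]
  split_ifs <;> simp_all

lemma loopB_cons_lt (tl : List Char) :
    stripTagsLoopB ('<' :: tl) = skipTag tl := by
  conv_lhs => rw [stripTagsLoopB.eq_def]
  rw [skipTag]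
  simp

lemma skipTag_nil : skipTag [] = [] := by rw [skipTag]; simp

lemma skipTag_cons_gt (tl : List Char) : skipTag ('>' :: tl) = stripTagsLoopB tl := by
  rw [skipTag]; simp

lemma skipTag_cons_ne (c : Char) (tl : List Char) (hg : c ≠ '>') :
    skipTag (c :: tl) = skipTag tl := by
  rw [skipTag, skipTag]; simp [hg]

lemma loop_equiv (s : List Char) :
    (∀ acc, (stripTagsLoopA s (0, acc)).2 = acc ++ stripTagsLoopB s) ∧
    (∀ acc, (stripTagsLoopA s (1, acc)).2 = acc ++ skipTag s) := by
  induction s with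
  | nil =>
    constructor <;> intro acc <;> simp [stripTagsLoopA, loopB_nil, skipTag_nil]
  | cons c tl ih =>
    constructor
    · intro acc
      by_cases hc : c = '<'
      · subst hc
        have h : stripTagsLoopA ('<' :: tl) (0, acc) = stripTagsLoopA tl (1, acc) := by
          simp [stripTagsLoopA]
        rw [h, ih.2, loopB_cons_lt]
      · have h : stripTagsLoopA (c :: tl) (0, acc) = stripTagsLoopA tl (0, acc ++ [c]) := by
          simp [stripTagsLoopA, hc]
        rw [h, ih.1, loopB_cons_ne c tl hc]
        simp
    · intro acc
      by_cases hc : c = '<'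
      · subst hc
        have h : stripTagsLoopA ('<' :: tl) (1, acc) = stripTagsLoopA tl (1, acc) := by
          simp [stripTagsLoopA]
        rw [h, ih.2, skipTag_cons_ne '<' tl (by decide)]
      · by_cases hg : c = '>'
        · subst hg
          have h : stripTagsLoopA ('>' :: tl) (1, acc) = stripTagsLoopA tl (0, acc) := by
            simp [stripTagsLoopA]
          rw [h, ih.1, skipTag_cons_gt]
        · have h : stripTagsLoopA (c :: tl) (1, acc) = stripTagsLoopA tl (1, acc) := by
            simp [stripTagsLoopA, hc, hg]
          rw [h, ih.2, skipTag_cons_ne c tl hg]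

lemma loopA_eq (s : List Char) : (stripTagsLoopA s (0, [])).2 = stripTagsLoopB s := by
  rw [(loop_equiv s).1 []]; simp

-- ===== VERDICT (by name: the statement is the Claim_ definition above) =====
theorem stripTags_spec : Claim_equal_stripTags := by
  intro pageContents _
  unfold Spec_stripTags stripTags stripTags_alt
  simp only [loopA_eq]
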